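-- pv_equiv track=rewrite | github.com/lokashrinav/lc | 1950 Maximum of Minimum Values in All Subarrays/1950maximum-of-minimum-values-in-all-subarrays.py | findMaximums
-- ===== SOURCE A (Python) =====
-- from typing import List
--
-- def findMaximums(nums: List[int]) -> List[int]:
--     arr = nums
--     n = len(arr)
--     prev_smaller = [-1] * n
--     next_smaller = [n] * n
--
--     # Previous smaller: strict smaller to the left
--     stack = []
--     for i in range(n):
--         while stack and arr[stack[-1]] >= arr[i]:
--             stack.pop()
--         prev_smaller[i] = stack[-1] if stack else -1
--         stack.append(i)
--
--     # Next smaller: smaller or equal to the right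
--     stack = []
--     for i in range(n - 1, -1, -1):
--         while stack and arr[stack[-1]] > arr[i]:
--             stack.pop()
--         next_smaller[i] = stack[-1] if stack else n
--         stack.append(i)
--
--     # ans_len[L] stores the best value for window length L
--     ans_len = [0] * (n + 1)
--     for i in range(n):
--         L = next_smaller[i] - prev_smaller[i] - 1
--         ans_len[L] = max(ans_len[L], arr[i])
--
--     # Fill blanks by carrying from larger windows
--     for L in range(n - 1, 0, -1):
--         ans_len[L] = max(ans_len[L], ans_len[L + 1])
--
--     return ans_len[1:]
-- ===== SOURCE B (Python) =====
-- from typing import List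
--
-- def findMaximums(nums: List[int]) -> List[int]:
--     # Brute force: for each start i keep a running minimum over j, and take
--     # per-length maxima in ans (ans starts at 0, like A's ans_len table).
--     n = len(nums)
--     ans = [0] * (n + 1)
--     for i in range(n):
--         cur = nums[i]
--         for j in range(i, n):
--             if nums[j] < cur:
--                 cur = nums[j]
--             L = j - i + 1
--             if cur > ans[L]:
--                 ans[L] = cur
--     return ans[1:]
-- ===== Notes on version B (the rewrite author's own statement) =====
-- stated objective: simpler
-- what changed: Replaced the three monotonic-stack passes (previous-smaller, next-smaller, span table plus carry sweep) by the plain two-nested-loop brute force that keeps a running minimum per start index and takes per-length maxima in a 0-initialized table.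
import Mathlib
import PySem

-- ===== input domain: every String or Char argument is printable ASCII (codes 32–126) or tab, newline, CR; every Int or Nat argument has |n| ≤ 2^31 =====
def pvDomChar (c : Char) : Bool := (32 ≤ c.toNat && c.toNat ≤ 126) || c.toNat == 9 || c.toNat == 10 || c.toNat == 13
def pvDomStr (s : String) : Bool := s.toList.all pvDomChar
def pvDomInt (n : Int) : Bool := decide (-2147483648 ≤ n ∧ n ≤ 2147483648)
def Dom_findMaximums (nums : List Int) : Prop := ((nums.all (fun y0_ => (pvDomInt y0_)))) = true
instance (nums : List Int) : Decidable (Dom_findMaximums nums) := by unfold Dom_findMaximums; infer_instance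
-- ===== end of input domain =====

-- B replaces A's three monotonic-stack passes by the plain O(n²) two-nested-loop
-- brute force (running minimum per start, per-length maxima); objective: simpler.

-- ===== PORT A =====
-- while-loop 'while stack and arr[stack[-1]] >= arr[i]: stack.pop()'
-- (stack modelled head-first: append = cons, stack[-1] = head, pop = tail).
-- All list indices A uses are provably in range, so arr[k] is ported as pyGetD arr k 0.
def pvPopPrev (arr : List Int) (x : Int) : List Int → List Int
  | [] => []
  | t :: s => if PySem.List.pyGetD arr t 0 ≥ x then pvPopPrev arr x s else t :: s

-- while-loop 'while stack and arr[stack[-1]] > arr[i]: stack.pop()'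
def pvPopNext (arr : List Int) (x : Int) : List Int → List Int
  | [] => []
  | t :: s => if PySem.List.pyGetD arr t 0 > x then pvPopNext arr x s else t :: s

def findMaximums (nums : List Int) : List Int :=
  let arr := nums
  let n : Int := arr.length
  -- prev_smaller loop
  let ps := (PySem.List.pyRange 0 n 1).foldl
      (fun (acc : List Int × List Int) i =>
        let st := pvPopPrev arr (PySem.List.pyGetD arr i 0) acc.2
        (PySem.List.pySetD acc.1 i (match st with | [] => (-1 : Int) | t :: _ => t), i :: st))
      (List.replicate arr.length (-1 : Int), [])
  let prev := ps.1
  -- next_smaller loop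
  let ns := (PySem.List.pyRange (n - 1) (-1) (-1)).foldl
      (fun (acc : List Int × List Int) i =>
        let st := pvPopNext arr (PySem.List.pyGetD arr i 0) acc.2
        (PySem.List.pySetD acc.1 i (match st with | [] => n | t :: _ => t), i :: st))
      (List.replicate arr.length n, [])
  let next := ns.1
  -- ans_len[L] = max(ans_len[L], arr[i]) at L = next[i] - prev[i] - 1
  let ans1 := (PySem.List.pyRange 0 n 1).foldl
      (fun ans i =>
        let L := PySem.List.pyGetD next i 0 - PySem.List.pyGetD prev i 0 - 1
        PySem.List.pySetD ans L (max (PySem.List.pyGetD ans L 0) (PySem.List.pyGetD arr i 0)))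
      (List.replicate (arr.length + 1) (0 : Int))
  -- carry: for L in range(n-1, 0, -1): ans_len[L] = max(ans_len[L], ans_len[L+1])
  let ans2 := (PySem.List.pyRange (n - 1) 0 (-1)).foldl
      (fun ans L =>
        PySem.List.pySetD ans L (max (PySem.List.pyGetD ans L 0) (PySem.List.pyGetD ans (L + 1) 0)))
      ans1
  PySem.List.slice ans2 (some 1) none

-- ===== PORT B =====
def findMaximums_alt (nums : List Int) : List Int :=
  let n : Int := nums.length
  let ans := (PySem.List.pyRange 0 n 1).foldl
      (fun ans i =>
        ((PySem.List.pyRange i n 1).foldl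
          (fun (s : Int × List Int) j =>
            let cur := if PySem.List.pyGetD nums j 0 < s.1 then PySem.List.pyGetD nums j 0 else s.1
            let L := j - i + 1
            (cur, if cur > PySem.List.pyGetD s.2 L 0 then PySem.List.pySetD s.2 L cur else s.2))
          (PySem.List.pyGetD nums i 0, ans)).2)
      (List.replicate (nums.length + 1) (0 : Int))
  PySem.List.slice ans (some 1) none

-- ===== PRECONDITION & SPEC =====
def Spec_findMaximums (nums : List Int) (out : List Int) : Prop := out = findMaximums_alt nums
instance (nums : List Int) (out : List Int) : Decidable (Spec_findMaximums nums out) := by unfold Spec_findMaximums; infer_instance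

-- ===== CLAIM (what is proved, stated in full; the proofs are below) =====
def Claim_equal_findMaximums : Prop := ∀ (nums : List Int), Dom_findMaximums nums → Spec_findMaximums nums (findMaximums nums)

-- ===== LEMMAS AND PROOFS =====

-- `arr[k]` (total form; every access is in range)
def pvG (arr : List Int) (k : Int) : Int := PySem.List.pyGetD arr k 0
-- `stack[-1] if stack else d`
def pvHead (st : List Int) (d : Int) : Int := match st with | [] => d | t :: _ => t
-- canonical max-update `ans[p.1] = max(ans[p.1], p.2)`
def pvUpd (ans : List Int) (p : Int × Int) : List Int :=
  PySem.List.pySetD ans p.1 (max (PySem.List.pyGetD ans p.1 0) p.2)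
-- max of a list of ints, clamped at 0 (A's and B's tables start at 0)
def pvMax0 (l : List Int) : Int := l.foldl max 0
-- min(arr[i..j]) as B's running minimum computes it
def pvMin (arr : List Int) (i j : Int) : Int :=
  ((PySem.List.pyRange (i + 1) (j + 1) 1).map (pvG arr)).foldl min (pvG arr i)

-- named forms of the loop bodies of the two ports
def pvStepPrev (arr : List Int) (acc : List Int × List Int) (i : Int) : List Int × List Int :=
  let st := pvPopPrev arr (PySem.List.pyGetD arr i 0) acc.2
  (PySem.List.pySetD acc.1 i (match st with | [] => (-1 : Int) | t :: _ => t), i :: st)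
def pvStepNext (arr : List Int) (acc : List Int × List Int) (i : Int) : List Int × List Int :=
  let st := pvPopNext arr (PySem.List.pyGetD arr i 0) acc.2
  (PySem.List.pySetD acc.1 i (match st with | [] => (arr.length : Int) | t :: _ => t), i :: st)
def pvStepCarry (ans : List Int) (L : Int) : List Int :=
  PySem.List.pySetD ans L (max (PySem.List.pyGetD ans L 0) (PySem.List.pyGetD ans (L + 1) 0))
def pvStepInner (nums : List Int) (i : Int) (s : Int × List Int) (j : Int) : Int × List Int :=
  let cur := if PySem.List.pyGetD nums j 0 < s.1 then PySem.List.pyGetD nums j 0 else s.1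
  let L := j - i + 1
  (cur, if cur > PySem.List.pyGetD s.2 L 0 then PySem.List.pySetD s.2 L cur else s.2)

def pvPrevList (arr : List Int) : List Int :=
  ((PySem.List.pyRange 0 (arr.length : Int) 1).foldl (pvStepPrev arr)
    (List.replicate arr.length (-1 : Int), [])).1
def pvNextList (arr : List Int) : List Int :=
  ((PySem.List.pyRange ((arr.length : Int) - 1) (-1) (-1)).foldl (pvStepNext arr)
    (List.replicate arr.length (arr.length : Int), [])).1
def pvSpan (arr : List Int) (i : Int) : Int :=
  PySem.List.pyGetD (pvNextList arr) i 0 - PySem.List.pyGetD (pvPrevList arr) i 0 - 1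
def pvAns1 (arr : List Int) : List Int :=
  (PySem.List.pyRange 0 (arr.length : Int) 1).foldl
    (fun ans i => pvUpd ans (pvSpan arr i, PySem.List.pyGetD arr i 0))
    (List.replicate (arr.length + 1) (0 : Int))
def pvAns2 (arr : List Int) : List Int :=
  (PySem.List.pyRange ((arr.length : Int) - 1) 0 (-1)).foldl pvStepCarry (pvAns1 arr)
def pvAnsB (nums : List Int) : List Int :=
  (PySem.List.pyRange 0 (nums.length : Int) 1).foldl
    (fun ans i => ((PySem.List.pyRange i (nums.length : Int) 1).foldl (pvStepInner nums i)
        (PySem.List.pyGetD nums i 0, ans)).2)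
    (List.replicate (nums.length + 1) (0 : Int))

lemma findMaximums_eq (nums : List Int) :
    findMaximums nums = PySem.List.slice (pvAns2 nums) (some 1) none := rfl
lemma findMaximums_alt_eq (nums : List Int) :
    findMaximums_alt nums = PySem.List.slice (pvAnsB nums) (some 1) none := rfl

-- ---- pvMax0 toolkit ----
lemma pvMax0_nonneg (l : List Int) : 0 ≤ pvMax0 l := (PySem.List.le_foldl_max l 0).1
lemma le_pvMax0_of_mem {l : List Int} {x : Int} (h : x ∈ l) : x ≤ pvMax0 l :=
  (PySem.List.le_foldl_max l 0).2 x h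
lemma pvMax0_le {l : List Int} {c : Int} (h0 : 0 ≤ c) (h : ∀ x ∈ l, x ≤ c) : pvMax0 l ≤ c := by
  rcases PySem.List.foldl_max_mem l 0 with hm | hm
  · rw [pvMax0, hm]; exact h0
  · exact h _ hm
lemma pvMax0_eq_of {l1 l2 : List Int} (h12 : ∀ x ∈ l1, ∃ y ∈ l2, x ≤ y)
    (h21 : ∀ x ∈ l2, ∃ y ∈ l1, x ≤ y) : pvMax0 l1 = pvMax0 l2 := by
  apply le_antisymm
  · exact pvMax0_le (pvMax0_nonneg l2) (fun x hx => by
      obtain ⟨y, hy, hxy⟩ := h12 x hx; exact hxy.trans (le_pvMax0_of_mem hy))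
  · exact pvMax0_le (pvMax0_nonneg l1) (fun x hx => by
      obtain ⟨y, hy, hxy⟩ := h21 x hx; exact hxy.trans (le_pvMax0_of_mem hy))
lemma foldl_max_max (l : List Int) : ∀ a b : Int, l.foldl max (max a b) = max a (l.foldl max b) := by
  induction l with
  | nil => intro a b; rfl
  | cons x t ih => intro a b; simp only [List.foldl_cons, max_assoc]; exact ih a (max b x)
lemma pvMax0_append (l1 l2 : List Int) : pvMax0 (l1 ++ l2) = max (pvMax0 l1) (pvMax0 l2) := by
  have h : l1.foldl max 0 = max (pvMax0 l1) 0 := (max_eq_left (pvMax0_nonneg l1)).symm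
  rw [pvMax0, List.foldl_append, h]
  exact foldl_max_max l2 (pvMax0 l1) 0

-- ---- fold-of-max-updates characterization ----
lemma length_foldl_pvUpd (ps : List (Int × Int)) (ans : List Int) :
    (ps.foldl pvUpd ans).length = ans.length := by
  induction ps generalizing ans with
  | nil => rfl
  | cons p t ih => simp only [List.foldl_cons]; rw [ih, pvUpd, PySem.List.length_pySetD]
lemma getD_foldl_pvUpd (ps : List (Int × Int)) (ans : List Int) (L : Nat) (hL : L < ans.length)
    (hps : ∀ p ∈ ps, 0 ≤ p.1 ∧ p.1 < (ans.length : Int)) :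
    (ps.foldl pvUpd ans).getD L 0
      = ((ps.filter (fun p => p.1 = (L : Int))).map Prod.snd).foldl max (ans.getD L 0) := by
  induction ps generalizing ans with
  | nil => simp
  | cons p t ih =>
    have hp := hps p List.mem_cons_self
    have hin : p.1.toNat < ans.length := by omega
    have hcast : p.1 = ((p.1.toNat : Nat) : Int) := by omega
    have hlen : (pvUpd ans p).length = ans.length := by rw [pvUpd, PySem.List.length_pySetD]
    have hget : ∀ (m : Nat), (pvUpd ans p).getD m 0
        = if m = p.1.toNat then max (ans.getD p.1.toNat 0) p.2 else ans.getD m 0 := by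
      intro m
      rw [← PySem.List.pyGetD_natCast (pvUpd ans p) m 0, pvUpd, hcast,
          PySem.List.pyGetD_pySetD_natCast ans p.1.toNat m _ 0 hin,
          PySem.List.pyGetD_natCast]
      simp only [PySem.List.pyGetD_natCast]
      rw [Int.toNat_natCast]
    have hrec := ih (pvUpd ans p) (by omega)
      (fun q hq => by have := hps q (List.mem_cons_of_mem p hq); omega)
    rw [List.foldl_cons, hrec]
    by_cases hc : p.1 = (L : Int)
    · have hL' : L = p.1.toNat := by omega
      rw [hget L, if_pos hL', ← hL']
      simp [hc]
    · have hL' : ¬ (L = p.1.toNat) := by omega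
      rw [hget L, if_neg hL']
      simp [hc]

-- ---- pop lemmas ----
lemma pvPopPrev_suffix (arr : List Int) (x : Int) (st : List Int) :
    (pvPopPrev arr x st).IsSuffix st := by
  induction st with
  | nil => exact List.nil_suffix
  | cons t s ih =>
    by_cases h : PySem.List.pyGetD arr t 0 ≥ x
    · simpa [pvPopPrev, h] using ih.trans (List.suffix_cons t s)
    · simp [pvPopPrev, h]
lemma pvPopPrev_dropped (arr : List Int) (x : Int) (st : List Int) {k : Int}
    (hk : k ∈ st) (hk' : k ∉ pvPopPrev arr x st) : x ≤ pvG arr k := by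
  induction st with
  | nil => cases hk
  | cons t s ih =>
    by_cases h : PySem.List.pyGetD arr t 0 ≥ x
    · rcases List.mem_cons.mp hk with rfl | hk2
      · exact h
      · exact ih hk2 (by simpa [pvPopPrev, h] using hk')
    · exact absurd (by simpa [pvPopPrev, h] using hk) hk'
lemma pvPopPrev_head (arr : List Int) (x : Int) (st : List Int) {t : Int} {s : List Int}
    (h : pvPopPrev arr x st = t :: s) : pvG arr t < x := by
  induction st with
  | nil => cases h
  | cons a r ih =>
    by_cases ha : PySem.List.pyGetD arr a 0 ≥ x
    · exact ih (by simpa [pvPopPrev, ha] using h)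
    · rw [pvPopPrev] at h; simp only [if_neg ha] at h
      cases h; exact lt_of_not_ge ha
lemma pvPopNext_suffix (arr : List Int) (x : Int) (st : List Int) :
    (pvPopNext arr x st).IsSuffix st := by
  induction st with
  | nil => exact List.nil_suffix
  | cons t s ih =>
    by_cases h : PySem.List.pyGetD arr t 0 > x
    · simpa [pvPopNext, h] using ih.trans (List.suffix_cons t s)
    · simp [pvPopNext, h]
lemma pvPopNext_dropped (arr : List Int) (x : Int) (st : List Int) {k : Int}
    (hk : k ∈ st) (hk' : k ∉ pvPopNext arr x st) : x < pvG arr k := by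
  induction st with
  | nil => cases hk
  | cons t s ih =>
    by_cases h : PySem.List.pyGetD arr t 0 > x
    · rcases List.mem_cons.mp hk with rfl | hk2
      · exact h
      · exact ih hk2 (by simpa [pvPopNext, h] using hk')
    · exact absurd (by simpa [pvPopNext, h] using hk) hk'
lemma pvPopNext_head (arr : List Int) (x : Int) (st : List Int) {t : Int} {s : List Int}
    (h : pvPopNext arr x st = t :: s) : pvG arr t ≤ x := by
  induction st with
  | nil => cases h
  | cons a r ih =>
    by_cases ha : PySem.List.pyGetD arr a 0 > x
    · exact ih (by simpa [pvPopNext, ha] using h)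
    · rw [pvPopNext] at h; simp only [if_neg ha] at h
      cases h; exact le_of_not_gt ha

-- ---- stack invariants and the prev/next specifications ----
def pvPrevOK (arr : List Int) (i p : Int) : Prop :=
  -1 ≤ p ∧ p < i ∧ (∀ k, p < k → k < i → pvG arr i ≤ pvG arr k) ∧
    (p = -1 ∨ (0 ≤ p ∧ pvG arr p < pvG arr i))
def pvNextOK (arr : List Int) (i q : Int) : Prop :=
  i < q ∧ q ≤ arr.length ∧ (∀ k, i < k → k < q → pvG arr i ≤ pvG arr k) ∧
    (q = arr.length ∨ pvG arr q ≤ pvG arr i)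
def pvInvP (arr : List Int) (i : Int) (st : List Int) : Prop :=
  List.Pairwise (· > ·) st ∧
    ∀ k, k ∈ st ↔ (0 ≤ k ∧ k < i ∧ ∀ m, k < m → m < i → pvG arr k < pvG arr m)
def pvInvN (arr : List Int) (b : Int) (st : List Int) : Prop :=
  List.Pairwise (· < ·) st ∧
    ∀ k, k ∈ st ↔ (b < k ∧ k < arr.length ∧ ∀ m, b < m → m < k → pvG arr k ≤ pvG arr m)

lemma pvStepP_spec (arr : List Int) (i : Int) (st : List Int) (hi : 0 ≤ i)
    (hInv : pvInvP arr i st) :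
    pvInvP arr (i + 1) (i :: pvPopPrev arr (pvG arr i) st) ∧
      pvPrevOK arr i (pvHead (pvPopPrev arr (pvG arr i) st) (-1)) := by
  obtain ⟨hPair, hMem⟩ := hInv
  set x := pvG arr i with hx
  set st' := pvPopPrev arr x st with hst'
  have hsuf : st'.IsSuffix st := hst' ▸ pvPopPrev_suffix arr x st
  have hsub : ∀ {k : Int}, k ∈ st' → k ∈ st := fun hk => hsuf.sublist.mem hk
  have hPair' : List.Pairwise (· > ·) st' := hPair.sublist hsuf.sublist
  have hdrop : ∀ {k : Int}, k ∈ st → k ∉ st' → x ≤ pvG arr k := by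
    intro k hk hk'
    exact pvPopPrev_dropped arr x st hk (by rw [← hst']; exact hk')
  have hlt : ∀ k ∈ st', pvG arr k < x := by
    intro k hk
    cases hs : st' with
    | nil => rw [hs] at hk; cases hk
    | cons t s =>
      have hht : pvG arr t < x := pvPopPrev_head arr x st (hst'.symm.trans hs)
      rw [hs] at hk
      rcases List.mem_cons.mp hk with rfl | hks
      · exact hht
      · have hp2 := hPair'; rw [hs] at hp2
        have hts : t > k := (List.pairwise_cons.mp hp2).1 k hks
        have htst : t ∈ st := hsub (by rw [hs]; exact List.mem_cons_self)
        have hti : t < i := ((hMem t).mp htst).2.1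
        have hkm := (hMem k).mp (hsub (by rw [hs]; exact List.mem_cons_of_mem t hks))
        exact lt_trans (hkm.2.2 t hts hti) hht
  have hpmem : ∀ k ∈ st', k ≤ pvHead st' (-1) := by
    intro k hk
    cases hs : st' with
    | nil => rw [hs] at hk; cases hk
    | cons t s =>
      rw [hs] at hk
      rcases List.mem_cons.mp hk with rfl | hks
      · simp [pvHead]
      · have hp2 := hPair'; rw [hs] at hp2
        have := (List.pairwise_cons.mp hp2).1 k hks
        simp only [pvHead]; omega
  have hbase : -1 ≤ pvHead st' (-1) ∧ pvHead st' (-1) < i ∧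
      (pvHead st' (-1) = -1 ∨ (0 ≤ pvHead st' (-1) ∧ pvG arr (pvHead st' (-1)) < x)) := by
    cases hs : st' with
    | nil =>
      refine ⟨le_of_eq rfl, ?_, Or.inl rfl⟩
      show (-1 : Int) < i
      omega
    | cons t s =>
      have hht : pvG arr t < x := pvPopPrev_head arr x st (hst'.symm.trans hs)
      have htst : t ∈ st := hsub (by rw [hs]; exact List.mem_cons_self)
      have h1 := (hMem t).mp htst
      simp only [pvHead]
      exact ⟨by omega, h1.2.1, Or.inr ⟨h1.1, hht⟩⟩
  have hdomk : ∀ d : Nat, ∀ k : Int, pvHead st' (-1) < k → k < i → i - k ≤ (d : Int) →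
      x ≤ pvG arr k := by
    intro d
    induction d with
    | zero => intro k h1 h2 h3; omega
    | succ d ihd =>
      intro k h1 h2 h3
      by_cases hkst : k ∈ st
      · by_cases hkst' : k ∈ st'
        · exact absurd (hpmem k hkst') (by omega)
        · exact hdrop hkst hkst'
      · have hnr : ¬ (0 ≤ k ∧ k < i ∧ ∀ m, k < m → m < i → pvG arr k < pvG arr m) :=
          fun hr => hkst ((hMem k).mpr hr)
        push Not at hnr
        obtain ⟨m, hm1, hm2, hm3⟩ := hnr (by omega) h2
        exact le_trans (ihd m (by omega) hm2 (by omega)) hm3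
  have hdom : ∀ k : Int, pvHead st' (-1) < k → k < i → x ≤ pvG arr k := by
    intro k h1 h2
    exact hdomk (i - k).toNat k h1 h2 (by omega)
  constructor
  · constructor
    · rw [List.pairwise_cons]
      exact ⟨fun j hj => ((hMem j).mp (hsub hj)).2.1, hPair'⟩
    · intro k
      constructor
      · intro hk
        rcases List.mem_cons.mp hk with rfl | hk'
        · exact ⟨hi, by omega, fun m hm1 hm2 => by omega⟩
        · have h1 := (hMem k).mp (hsub hk')
          refine ⟨h1.1, by omega, fun m hm1 hm2 => ?_⟩
          by_cases hmi : m < i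
          · exact h1.2.2 m hm1 hmi
          · have : m = i := by omega
            subst this
            exact hlt k hk'
      · rintro ⟨h0, h1, h2⟩
        by_cases hki : k = i
        · rw [hki]; exact List.mem_cons_self
        · have hklt : k < i := by omega
          have hkst : k ∈ st := (hMem k).mpr ⟨h0, hklt, fun m hm1 hm2 => h2 m hm1 (by omega)⟩
          apply List.mem_cons_of_mem
          by_contra hk'
          exact absurd (h2 i hklt (by omega)) (not_lt.mpr (hdrop hkst hk'))
  · exact ⟨hbase.1, hbase.2.1, hdom, hbase.2.2⟩
lemma pvStepN_spec (arr : List Int) (i : Int) (st : List Int) (hi : i < arr.length)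
    (hInv : pvInvN arr i st) :
    pvInvN arr (i - 1) (i :: pvPopNext arr (pvG arr i) st) ∧
      pvNextOK arr i (pvHead (pvPopNext arr (pvG arr i) st) arr.length) := by
  obtain ⟨hPair, hMem⟩ := hInv
  set x := pvG arr i with hx
  set st' := pvPopNext arr x st with hst'
  have hsuf : st'.IsSuffix st := hst' ▸ pvPopNext_suffix arr x st
  have hsub : ∀ {k : Int}, k ∈ st' → k ∈ st := fun hk => hsuf.sublist.mem hk
  have hPair' : List.Pairwise (· < ·) st' := hPair.sublist hsuf.sublist
  have hdrop : ∀ {k : Int}, k ∈ st → k ∉ st' → x < pvG arr k := by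
    intro k hk hk'
    exact pvPopNext_dropped arr x st hk (by rw [← hst']; exact hk')
  have hle : ∀ k ∈ st', pvG arr k ≤ x := by
    intro k hk
    cases hs : st' with
    | nil => rw [hs] at hk; cases hk
    | cons t s =>
      have hht : pvG arr t ≤ x := pvPopNext_head arr x st (hst'.symm.trans hs)
      rw [hs] at hk
      rcases List.mem_cons.mp hk with rfl | hks
      · exact hht
      · have hp2 := hPair'; rw [hs] at hp2
        have hts : t < k := (List.pairwise_cons.mp hp2).1 k hks
        have htst : t ∈ st := hsub (by rw [hs]; exact List.mem_cons_self)
        have hti : i < t := ((hMem t).mp htst).1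
        have hkm := (hMem k).mp (hsub (by rw [hs]; exact List.mem_cons_of_mem t hks))
        exact le_trans (hkm.2.2 t hti hts) hht
  have hpmem : ∀ k ∈ st', pvHead st' arr.length ≤ k := by
    intro k hk
    cases hs : st' with
    | nil => rw [hs] at hk; cases hk
    | cons t s =>
      rw [hs] at hk
      rcases List.mem_cons.mp hk with rfl | hks
      · simp [pvHead]
      · have hp2 := hPair'; rw [hs] at hp2
        have := (List.pairwise_cons.mp hp2).1 k hks
        simp only [pvHead]; omega
  have hbase : i < pvHead st' arr.length ∧ pvHead st' arr.length ≤ arr.length ∧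
      (pvHead st' arr.length = arr.length ∨ pvG arr (pvHead st' arr.length) ≤ x) := by
    cases hs : st' with
    | nil =>
      refine ⟨?_, le_of_eq rfl, Or.inl rfl⟩
      show i < (arr.length : Int)
      omega
    | cons t s =>
      have hht : pvG arr t ≤ x := pvPopNext_head arr x st (hst'.symm.trans hs)
      have htst : t ∈ st := hsub (by rw [hs]; exact List.mem_cons_self)
      have h1 := (hMem t).mp htst
      simp only [pvHead]
      exact ⟨h1.1, by omega, Or.inr hht⟩
  have hdomk : ∀ d : Nat, ∀ k : Int, i < k → k < pvHead st' arr.length → k - i ≤ (d : Int) →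
      x ≤ pvG arr k := by
    intro d
    induction d with
    | zero => intro k h1 h2 h3; omega
    | succ d ihd =>
      intro k h1 h2 h3
      by_cases hkst : k ∈ st
      · by_cases hkst' : k ∈ st'
        · exact absurd (hpmem k hkst') (by omega)
        · exact le_of_lt (hdrop hkst hkst')
      · have hnr : ¬ (i < k ∧ k < arr.length ∧ ∀ m, i < m → m < k → pvG arr k ≤ pvG arr m) :=
          fun hr => hkst ((hMem k).mpr hr)
        push Not at hnr
        obtain ⟨m, hm1, hm2, hm3⟩ := hnr h1 (by omega)
        exact le_trans (ihd m hm1 (by omega) (by omega)) (le_of_lt hm3)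
  have hdom : ∀ k : Int, i < k → k < pvHead st' arr.length → x ≤ pvG arr k := by
    intro k h1 h2
    exact hdomk (k - i).toNat k h1 h2 (by omega)
  constructor
  · constructor
    · rw [List.pairwise_cons]
      exact ⟨fun j hj => ((hMem j).mp (hsub hj)).1, hPair'⟩
    · intro k
      constructor
      · intro hk
        rcases List.mem_cons.mp hk with rfl | hk'
        · exact ⟨by omega, hi, fun m hm1 hm2 => by omega⟩
        · have h1 := (hMem k).mp (hsub hk')
          refine ⟨by omega, h1.2.1, fun m hm1 hm2 => ?_⟩
          by_cases hmi : i < m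
          · exact h1.2.2 m hmi hm2
          · have : m = i := by omega
            subst this
            exact hle k hk'
      · rintro ⟨h0, h1, h2⟩
        by_cases hki : k = i
        · rw [hki]; exact List.mem_cons_self
        · have hklt : i < k := by omega
          have hkst : k ∈ st := (hMem k).mpr ⟨hklt, h1, fun m hm1 hm2 => h2 m (by omega) hm2⟩
          apply List.mem_cons_of_mem
          by_contra hk'
          exact absurd (h2 i (by omega) hklt) (not_le.mpr (hdrop hkst hk'))
  · exact ⟨hbase.1, hbase.2.1, hdom, hbase.2.2⟩

lemma getD_pySetD_self (l : List Int) (a : Nat) (v : Int) (h : a < l.length) :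
    (PySem.List.pySetD l (a : Int) v).getD a 0 = v := by
  rw [PySem.List.pySetD_natCast]
  simp [List.getD_eq_getElem?_getD, h]
lemma getD_pySetD_ne (l : List Int) (a k : Nat) (v : Int) (h : k ≠ a) :
    (PySem.List.pySetD l (a : Int) v).getD k 0 = l.getD k 0 := by
  rw [PySem.List.pySetD_natCast]
  simp [List.getD_eq_getElem?_getD, List.getElem?_set_ne (fun hh => h hh.symm)]

lemma pvPrevLoop (arr : List Int) : ∀ (b a : Nat), a + b = arr.length → ∀ (pl st : List Int),
    pl.length = arr.length → pvInvP arr a st →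
    (∀ k : Nat, k < a → pvPrevOK arr k (pl.getD k 0)) →
    (((PySem.List.pyRange (a : Int) (arr.length : Int) 1).foldl (pvStepPrev arr)
        (pl, st)).1.length = arr.length) ∧
    ∀ k : Nat, k < arr.length →
      pvPrevOK arr k (((PySem.List.pyRange (a : Int) (arr.length : Int) 1).foldl
        (pvStepPrev arr) (pl, st)).1.getD k 0) := by
  intro b
  induction b with
  | zero =>
    intro a hab pl st hlen hInv hOK
    rw [PySem.List.pyRange_one_eq_nil (by omega)]
    exact ⟨hlen, fun k hk => hOK k (by omega)⟩
  | succ b ih =>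
    intro a hab pl st hlen hInv hOK
    rw [PySem.List.pyRange_one_cons (by omega), List.foldl_cons]
    have hstep := pvStepP_spec arr (a : Int) st (by omega) hInv
    have heq : pvStepPrev arr (pl, st) (a : Int)
        = (PySem.List.pySetD pl (a : Int) (pvHead (pvPopPrev arr (pvG arr a) st) (-1)),
           (a : Int) :: pvPopPrev arr (pvG arr a) st) := rfl
    rw [heq]
    have hinv' : pvInvP arr ((a + 1 : Nat) : Int) ((a : Int) :: pvPopPrev arr (pvG arr a) st) := by
      have := hstep.1
      have hc : ((a + 1 : Nat) : Int) = (a : Int) + 1 := by push_cast; ring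
      rw [hc]; exact this
    have hok' : ∀ k : Nat, k < a + 1 →
        pvPrevOK arr k ((PySem.List.pySetD pl (a : Int)
          (pvHead (pvPopPrev arr (pvG arr a) st) (-1))).getD k 0) := by
      intro k hk
      by_cases hka : k = a
      · subst hka
        rw [getD_pySetD_self pl k _ (by omega)]
        exact hstep.2
      · rw [getD_pySetD_ne pl a k _ hka]
        exact hOK k (by omega)
    have hc1 : (((a + 1 : Nat)) : Int) = (a : Int) + 1 := by push_cast; ring
    have := ih (a + 1) (by omega) _ _
      (by rw [PySem.List.length_pySetD]; exact hlen) hinv' hok'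
    rw [hc1] at this
    exact this

lemma pvNextLoop (arr : List Int) : ∀ (a : Nat), a ≤ arr.length → ∀ (nl st : List Int),
    nl.length = arr.length → pvInvN arr ((a : Int) - 1) st →
    (∀ k : Nat, a ≤ k → k < arr.length → pvNextOK arr k (nl.getD k 0)) →
    (((PySem.List.pyRange ((a : Int) - 1) (-1) (-1)).foldl (pvStepNext arr)
        (nl, st)).1.length = arr.length) ∧
    ∀ k : Nat, k < arr.length →
      pvNextOK arr k (((PySem.List.pyRange ((a : Int) - 1) (-1) (-1)).foldl
        (pvStepNext arr) (nl, st)).1.getD k 0) := by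
  intro a
  induction a with
  | zero =>
    intro ha nl st hlen hInv hOK
    rw [show ((0 : Nat) : Int) - 1 = (-1 : Int) by norm_num,
        PySem.List.pyRange_neg_one_eq_nil (by omega)]
    exact ⟨hlen, fun k hk => hOK k (by omega) hk⟩
  | succ a ih =>
    intro ha nl st hlen hInv hOK
    have hc : ((a + 1 : Nat) : Int) - 1 = (a : Int) := by push_cast; ring
    rw [hc] at hInv ⊢
    rw [PySem.List.pyRange_neg_one_cons (by omega), List.foldl_cons]
    have hstep := pvStepN_spec arr (a : Int) st (by exact_mod_cast by omega) hInv
    have heq : pvStepNext arr (nl, st) (a : Int)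
        = (PySem.List.pySetD nl (a : Int) (pvHead (pvPopNext arr (pvG arr a) st) arr.length),
           (a : Int) :: pvPopNext arr (pvG arr a) st) := rfl
    rw [heq]
    have hok' : ∀ k : Nat, a ≤ k → k < arr.length →
        pvNextOK arr k ((PySem.List.pySetD nl (a : Int)
          (pvHead (pvPopNext arr (pvG arr a) st) arr.length)).getD k 0) := by
      intro k hk1 hk2
      by_cases hka : k = a
      · subst hka
        rw [getD_pySetD_self nl k _ (by omega)]
        exact hstep.2
      · rw [getD_pySetD_ne nl a k _ hka]
        exact hOK k (by omega) hk2
    exact ih (by omega) _ _ (by rw [PySem.List.length_pySetD]; exact hlen) hstep.1 hok'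

lemma pvPrevList_spec (arr : List Int) :
    (pvPrevList arr).length = arr.length ∧
      ∀ k : Nat, k < arr.length → pvPrevOK arr k ((pvPrevList arr).getD k 0) := by
  have h := pvPrevLoop arr arr.length 0 (by omega)
    (List.replicate arr.length (-1 : Int)) [] (by simp)
    (by
      constructor
      · exact List.Pairwise.nil
      · intro k
        simp only [List.not_mem_nil, false_iff]
        rintro ⟨h0, h1, -⟩
        omega)
    (fun k hk => absurd hk (by omega))
  rw [show ((0 : Nat) : Int) = (0 : Int) by norm_num] at h
  exact h
lemma pvNextList_spec (arr : List Int) :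
    (pvNextList arr).length = arr.length ∧
      ∀ k : Nat, k < arr.length → pvNextOK arr k ((pvNextList arr).getD k 0) := by
  have h := pvNextLoop arr arr.length (le_refl _)
    (List.replicate arr.length (arr.length : Int)) [] (by simp)
    (by
      constructor
      · exact List.Pairwise.nil
      · intro k
        simp only [List.not_mem_nil, false_iff]
        rintro ⟨h0, h1, -⟩
        omega)
    (fun k hk1 hk2 => absurd (lt_of_le_of_lt hk1 hk2) (lt_irrefl _))
  exact h

lemma pvSpan_bounds (arr : List Int) (i : Nat) (hi : i < arr.length) :
    1 ≤ pvSpan arr i ∧ pvSpan arr i ≤ arr.length := by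
  have hp := (pvPrevList_spec arr).2 i hi
  have hq := (pvNextList_spec arr).2 i hi
  obtain ⟨a1, a2, -, -⟩ := hp
  obtain ⟨b1, b2, -, -⟩ := hq
  unfold pvSpan
  rw [PySem.List.pyGetD_natCast, PySem.List.pyGetD_natCast]
  omega

-- ---- A's table after the span loop and the carry loop ----
lemma pvAns1_spec (arr : List Int) :
    (pvAns1 arr).length = arr.length + 1 ∧
      ∀ L : Nat, L < arr.length + 1 →
        (pvAns1 arr).getD L 0
          = pvMax0 (((List.range arr.length).filter
              (fun i : Nat => pvSpan arr (i : Int) = (L : Int))).map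
              (fun i : Nat => pvG arr (i : Int))) := by
  have heq : pvAns1 arr = ((List.range arr.length).map
      (fun i : Nat => (pvSpan arr i, pvG arr i))).foldl pvUpd
      (List.replicate (arr.length + 1) (0 : Int)) := by
    unfold pvAns1
    rw [PySem.List.pyRange_zero_nat, List.foldl_map, List.foldl_map]
    rfl
  constructor
  · rw [heq, length_foldl_pvUpd, List.length_replicate]
  · intro L hL
    have hg := getD_foldl_pvUpd
      ((List.range arr.length).map (fun i : Nat => (pvSpan arr i, pvG arr i)))
      (List.replicate (arr.length + 1) (0 : Int)) L
      (by simp only [List.length_replicate]; omega)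
      (by
        intro p hp
        obtain ⟨i, hi, rfl⟩ := List.mem_map.mp hp
        have hb := pvSpan_bounds arr i (List.mem_range.mp hi)
        constructor
        · omega
        · rw [List.length_replicate]; push_cast; omega)
    rw [heq, hg]
    rw [List.getD_replicate, List.filter_map, List.map_map]
    · simp only [Function.comp_def]
      rfl
    · omega

lemma pvCarry_spec (n : Nat) : ∀ (a : Nat), a ≤ n → ∀ (ans : List Int), ans.length = n + 1 →
    ((PySem.List.pyRange (a : Int) 0 (-1)).foldl pvStepCarry ans).length = n + 1 ∧
    (∀ M : Nat, a < M → M ≤ n →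
      ((PySem.List.pyRange (a : Int) 0 (-1)).foldl pvStepCarry ans).getD M 0 = ans.getD M 0) ∧
    (∀ L : Nat, 1 ≤ L → L ≤ a →
      ((PySem.List.pyRange (a : Int) 0 (-1)).foldl pvStepCarry ans).getD L 0
        = max (ans.getD L 0)
            (((PySem.List.pyRange (a : Int) 0 (-1)).foldl pvStepCarry ans).getD (L + 1) 0)) := by
  intro a
  induction a with
  | zero =>
    intro ha ans hlen
    rw [show ((0 : Nat) : Int) = (0 : Int) by norm_num,
        PySem.List.pyRange_neg_one_eq_nil (by omega)]
    exact ⟨hlen, fun M h1 h2 => rfl, fun L h1 h2 => absurd h2 (by omega)⟩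
  | succ a iha =>
    intro ha ans hlen
    rw [PySem.List.pyRange_neg_one_cons (by positivity), List.foldl_cons]
    set ans' := pvStepCarry ans ((a + 1 : Nat) : Int) with hans'
    have hlen' : ans'.length = n + 1 := by
      rw [hans', pvStepCarry, PySem.List.length_pySetD, hlen]
    have hget' : ∀ k : Nat, ans'.getD k 0
        = if k = a + 1 then max (ans.getD (a + 1) 0) (ans.getD (a + 2) 0) else ans.getD k 0 := by
      intro k
      have hc2 : ((a + 1 : Nat) : Int) + 1 = ((a + 2 : Nat) : Int) := by push_cast; ring
      rw [hans', pvStepCarry, hc2, PySem.List.pyGetD_natCast, PySem.List.pyGetD_natCast]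
      by_cases hk : k = a + 1
      · subst hk
        rw [if_pos rfl, getD_pySetD_self ans _ _ (by omega)]
      · rw [if_neg hk, getD_pySetD_ne ans _ _ _ hk]
    have hc1 : ((a + 1 : Nat) : Int) - 1 = ((a : Nat) : Int) := by push_cast; ring
    rw [hc1]
    obtain ⟨ihL, ihM, ihS⟩ := iha (by omega) ans' hlen'
    refine ⟨ihL, ?_, ?_⟩
    · intro M h1 h2
      rw [ihM M (by omega) h2, hget', if_neg (by omega)]
    · intro L h1 h2
      by_cases hLa : L ≤ a
      · rw [ihS L h1 hLa, hget', if_neg (by omega)]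
      · have hLe : L = a + 1 := by omega
        subst hLe
        have hr1 : ((PySem.List.pyRange ((a : Nat) : Int) 0 (-1)).foldl pvStepCarry ans').getD
            (a + 1) 0 = ans'.getD (a + 1) 0 := ihM (a + 1) (by omega) (by omega)
        have hr2 : ((PySem.List.pyRange ((a : Nat) : Int) 0 (-1)).foldl pvStepCarry ans').getD
            (a + 2) 0 = ans.getD (a + 2) 0 := by
          by_cases hn : a + 2 ≤ n
          · rw [ihM (a + 2) (by omega) hn, hget', if_neg (by omega)]
          · have h1 : n + 1 ≤ a + 2 := by omega
            rw [List.getD_eq_getElem?_getD, List.getD_eq_getElem?_getD,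
                List.getElem?_eq_none (by omega), List.getElem?_eq_none (by omega)]
        rw [hr1, hr2, hget', if_pos rfl]

lemma pvAns2_spec (arr : List Int) :
    (pvAns2 arr).length = arr.length + 1 ∧
      ∀ L : Nat, 1 ≤ L → L ≤ arr.length →
        (pvAns2 arr).getD L 0
          = pvMax0 (((List.range arr.length).filter
              (fun i : Nat => (L : Int) ≤ pvSpan arr (i : Int))).map
              (fun i : Nat => pvG arr (i : Int))) := by
  obtain ⟨h1len, h1get⟩ := pvAns1_spec arr
  rcases Nat.eq_zero_or_pos arr.length with hn | hn
  · constructor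
    · unfold pvAns2
      rw [hn, PySem.List.pyRange_neg_one_eq_nil (by norm_num)]
      simp only [List.foldl_nil]
      rw [h1len, hn]
    · intro L hL1 hL2
      omega
  · have hc : ((arr.length : Int) - 1) = ((arr.length - 1 : Nat) : Int) := by
      push_cast [hn]; ring
    obtain ⟨hrl, hrM, hrS⟩ := pvCarry_spec arr.length (arr.length - 1) (by omega) (pvAns1 arr) h1len
    have hr2 : pvAns2 arr = (PySem.List.pyRange ((arr.length - 1 : Nat) : Int) 0 (-1)).foldl
        pvStepCarry (pvAns1 arr) := by
      unfold pvAns2; rw [hc]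
    constructor
    · rw [hr2]; exact hrl
    · have key : ∀ d : Nat, ∀ L : Nat, 1 ≤ L → L ≤ arr.length → arr.length - L ≤ d →
          (pvAns2 arr).getD L 0
            = pvMax0 (((List.range arr.length).filter
                (fun i : Nat => (L : Int) ≤ pvSpan arr (i : Int))).map
                (fun i : Nat => pvG arr (i : Int))) := by
        intro d
        induction d with
        | zero =>
          intro L hL1 hL2 hLd
          have hLn : L = arr.length := by omega
          rw [hr2, hrM L (by omega) (by omega), h1get L (by omega)]
          apply pvMax0_eq_of
          · intro x hx
            obtain ⟨i, hi, rfl⟩ := List.mem_map.mp hx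
            obtain ⟨hir, hif⟩ := List.mem_filter.mp hi
            refine ⟨pvG arr i, List.mem_map.mpr ⟨i, List.mem_filter.mpr ⟨hir, ?_⟩, rfl⟩, le_refl _⟩
            simp only [decide_eq_true_eq] at hif ⊢
            omega
          · intro x hx
            obtain ⟨i, hi, rfl⟩ := List.mem_map.mp hx
            obtain ⟨hir, hif⟩ := List.mem_filter.mp hi
            refine ⟨pvG arr i, List.mem_map.mpr ⟨i, List.mem_filter.mpr ⟨hir, ?_⟩, rfl⟩, le_refl _⟩
            simp only [decide_eq_true_eq] at hif ⊢
            have hb := pvSpan_bounds arr i (List.mem_range.mp hir)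
            omega
        | succ d ihd =>
          intro L hL1 hL2 hLd
          by_cases hLn : L = arr.length
          · subst hLn
            exact ihd _ hL1 hL2 (by omega)
          · have hstep : (pvAns2 arr).getD L 0
                = max ((pvAns1 arr).getD L 0) ((pvAns2 arr).getD (L + 1) 0) := by
              rw [hr2]; exact hrS L hL1 (by omega)
            rw [hstep, h1get L (by omega), ihd (L + 1) (by omega) (by omega) (by omega),
                ← pvMax0_append]
            apply pvMax0_eq_of
            · intro x hx
              rcases List.mem_append.mp hx with hx' | hx'
              · obtain ⟨i, hi, rfl⟩ := List.mem_map.mp hx'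
                obtain ⟨hir, hif⟩ := List.mem_filter.mp hi
                refine ⟨pvG arr i, List.mem_map.mpr ⟨i, List.mem_filter.mpr ⟨hir, ?_⟩, rfl⟩,
                  le_refl _⟩
                simp only [decide_eq_true_eq] at hif ⊢
                omega
              · obtain ⟨i, hi, rfl⟩ := List.mem_map.mp hx'
                obtain ⟨hir, hif⟩ := List.mem_filter.mp hi
                refine ⟨pvG arr i, List.mem_map.mpr ⟨i, List.mem_filter.mpr ⟨hir, ?_⟩, rfl⟩,
                  le_refl _⟩
                simp only [decide_eq_true_eq] at hif ⊢
                push_cast at hif ⊢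
                omega
            · intro x hx
              obtain ⟨i, hi, rfl⟩ := List.mem_map.mp hx
              obtain ⟨hir, hif⟩ := List.mem_filter.mp hi
              simp only [decide_eq_true_eq] at hif
              refine ⟨pvG arr i, List.mem_append.mpr ?_, le_refl _⟩
              by_cases hsp : pvSpan arr (i : Int) = (L : Int)
              · exact Or.inl (List.mem_map.mpr ⟨i, List.mem_filter.mpr
                  ⟨hir, by simp only [decide_eq_true_eq]; exact hsp⟩, rfl⟩)
              · refine Or.inr (List.mem_map.mpr ⟨i, List.mem_filter.mpr
                  ⟨hir, by simp only [decide_eq_true_eq]; push_cast; omega⟩, rfl⟩)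
      intro L hL1 hL2
      exact key (arr.length - L) L hL1 hL2 (le_refl _)

-- ---- B's table ----
lemma pySetD_pyGetD_self (l : List Int) (L : Int) :
    PySem.List.pySetD l L (PySem.List.pyGetD l L 0) = l := by
  unfold PySem.List.pySetD PySem.List.pyGetD PySem.List.pySet? PySem.List.pyGet? PySem.List.pyIdx?
  split_ifs with h1 h2 h3 <;> simp_all
  · have hk : l.length - (-L).toNat < l.length := by omega
    rw [List.getElem?_eq_getElem hk]
    simp

lemma pvUpd_eq_step (ans : List Int) (L cur : Int) :
    (if cur > PySem.List.pyGetD ans L 0 then PySem.List.pySetD ans L cur else ans)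
      = pvUpd ans (L, cur) := by
  by_cases h : cur > PySem.List.pyGetD ans L 0
  · rw [if_pos h, pvUpd]
    congr 1
    exact (max_eq_right (le_of_lt h)).symm
  · rw [if_neg h, pvUpd]
    have hm : max (PySem.List.pyGetD ans L 0) cur = PySem.List.pyGetD ans L 0 :=
      max_eq_left (not_lt.mp h)
    rw [show ((L, cur).1) = L from rfl, show ((L, cur).2) = cur from rfl, hm,
        pySetD_pyGetD_self]

lemma pvMin_pred (arr : List Int) (i : Int) : pvMin arr i (i - 1) = pvG arr i := by
  unfold pvMin
  rw [PySem.List.pyRange_one_eq_nil (by omega)]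
  rfl
lemma pvMin_succ (arr : List Int) (i j : Int) (hij : i ≤ j + 1) :
    pvMin arr i (j + 1) = min (pvMin arr i j) (pvG arr (j + 1)) := by
  by_cases hij' : i ≤ j
  · unfold pvMin
    rw [show j + 1 + 1 = (j + 1) + 1 from rfl,
        PySem.List.pyRange_one_succ_right (by omega), List.map_append, List.foldl_append]
    rfl
  · have hi : i = j + 1 := by omega
    subst hi
    have h1 : pvMin arr (j + 1) j = pvG arr (j + 1) := by
      have h := pvMin_pred arr (j + 1)
      rw [show j + 1 - 1 = j from by ring] at h
      exact h
    have h2 : pvMin arr (j + 1) (j + 1) = pvG arr (j + 1) := by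
      unfold pvMin
      rw [PySem.List.pyRange_one_eq_nil (by omega)]
      rfl
    rw [h1, h2, min_self]
lemma pvMin_le (arr : List Int) (i j k : Int) (hik : i ≤ k) (hkj : k ≤ j) :
    pvMin arr i j ≤ pvG arr k := by
  unfold pvMin
  rcases eq_or_lt_of_le hik with rfl | hik'
  · exact (PySem.List.foldl_min_le _ _).1
  · exact (PySem.List.foldl_min_le _ _).2 (pvG arr k)
      (List.mem_map.mpr ⟨k, PySem.List.mem_pyRange_one.mpr ⟨by omega, by omega⟩, rfl⟩)
lemma le_pvMin (arr : List Int) (i j : Int) (c : Int) (hij : i ≤ j)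
    (h : ∀ k, i ≤ k → k ≤ j → c ≤ pvG arr k) : c ≤ pvMin arr i j := by
  unfold pvMin
  rcases PySem.List.foldl_min_mem ((PySem.List.pyRange (i + 1) (j + 1) 1).map (pvG arr))
      (pvG arr i) with hm | hm
  · rw [hm]
    exact h i (le_refl _) hij
  · obtain ⟨k, hk, hke⟩ := List.mem_map.mp hm
    rw [← hke]
    obtain ⟨h1, h2⟩ := PySem.List.mem_pyRange_one.mp hk
    exact h k (by omega) (by omega)
lemma pvMin_lastWitness (arr : List Int) (i j : Int) (hij : i ≤ j) :
    ∃ k, i ≤ k ∧ k ≤ j ∧ pvG arr k = pvMin arr i j ∧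
      ∀ m, k < m → m ≤ j → pvMin arr i j < pvG arr m := by
  have hex : ∃ k, i ≤ k ∧ k ≤ j ∧ pvG arr k = pvMin arr i j := by
    rcases PySem.List.foldl_min_mem ((PySem.List.pyRange (i + 1) (j + 1) 1).map (pvG arr))
        (pvG arr i) with hm | hm
    · exact ⟨i, le_refl _, hij, hm.symm⟩
    · obtain ⟨k, hk, hke⟩ := List.mem_map.mp hm
      obtain ⟨h1, h2⟩ := PySem.List.mem_pyRange_one.mp hk
      exact ⟨k, by omega, by omega, hke.symm ▸ rfl⟩
  obtain ⟨k1, hk1, hk2, hk3⟩ := hex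
  have key : ∀ d : Nat, ∀ k, i ≤ k → k ≤ j → pvG arr k = pvMin arr i j → j - k ≤ (d : Int) →
      ∃ k0, i ≤ k0 ∧ k0 ≤ j ∧ pvG arr k0 = pvMin arr i j ∧
        ∀ m, k0 < m → m ≤ j → pvMin arr i j < pvG arr m := by
    intro d
    induction d with
    | zero =>
      intro k h1 h2 h3 h4
      exact ⟨k, h1, h2, h3, fun m hm1 hm2 => by omega⟩
    | succ d ihd =>
      intro k h1 h2 h3 h4
      by_cases hall : ∀ m, k < m → m ≤ j → pvMin arr i j < pvG arr m
      · exact ⟨k, h1, h2, h3, hall⟩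
      · push Not at hall
        obtain ⟨m, hm1, hm2, hm3⟩ := hall
        have hmm : pvG arr m = pvMin arr i j :=
          le_antisymm hm3 (pvMin_le arr i j m (by omega) hm2)
        exact ihd m (by omega) hm2 hmm (by omega)
  exact key (j - k1).toNat k1 hk1 hk2 hk3 (by omega)

def pvPairsB (nums : List Int) : List (Int × Int) :=
  (List.range nums.length).flatMap (fun i : Nat =>
    (PySem.List.pyRange (i : Int) (nums.length : Int) 1).map
      (fun j => (j - (i : Int) + 1, pvMin nums (i : Int) j)))

lemma pvInnerFold (nums : List Int) (iN : Nat) :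
    ∀ d b : Nat, iN ≤ b → b ≤ nums.length → nums.length - b = d → ∀ ans : List Int,
    (PySem.List.pyRange (b : Int) (nums.length : Int) 1).foldl (pvStepInner nums (iN : Int))
        (pvMin nums (iN : Int) ((b : Int) - 1), ans)
      = (pvMin nums (iN : Int) ((nums.length : Int) - 1),
         ((PySem.List.pyRange (b : Int) (nums.length : Int) 1).map
           (fun j => (j - (iN : Int) + 1, pvMin nums (iN : Int) j))).foldl pvUpd ans) := by
  intro d
  induction d with
  | zero =>
    intro b hb1 hb2 hb3 ans
    have hbn : b = nums.length := by omega
    subst hbn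
    rw [PySem.List.pyRange_one_eq_nil (le_refl _)]
    rfl
  | succ d ihd =>
    intro b hb1 hb2 hb3 ans
    have hbn : (b : Int) < (nums.length : Int) := by
      have : b < nums.length := by omega
      exact_mod_cast this
    rw [PySem.List.pyRange_one_cons hbn, List.foldl_cons, List.map_cons, List.foldl_cons]
    have hrec : pvMin nums (iN : Int) (b : Int)
        = min (pvMin nums (iN : Int) ((b : Int) - 1)) (pvG nums (b : Int)) := by
      have h := pvMin_succ nums (iN : Int) ((b : Int) - 1) (by omega)
      rw [show (b : Int) - 1 + 1 = (b : Int) from by ring] at h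
      exact h
    have hstep : pvStepInner nums (iN : Int) (pvMin nums (iN : Int) ((b : Int) - 1), ans) (b : Int)
        = (pvMin nums (iN : Int) (b : Int),
           pvUpd ans ((b : Int) - (iN : Int) + 1, pvMin nums (iN : Int) (b : Int))) := by
      simp only [pvStepInner]
      have hcur : (if PySem.List.pyGetD nums (b : Int) 0 < pvMin nums (iN : Int) ((b : Int) - 1)
          then PySem.List.pyGetD nums (b : Int) 0 else pvMin nums (iN : Int) ((b : Int) - 1))
          = pvMin nums (iN : Int) (b : Int) := by
        rw [hrec]
        simp only [pvG]
        rcases lt_or_ge (PySem.List.pyGetD nums (b : Int) 0)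
            (pvMin nums (iN : Int) ((b : Int) - 1)) with hlt | hge
        · rw [if_pos hlt, min_eq_right (le_of_lt hlt)]
        · rw [if_neg (not_lt.mpr hge), min_eq_left hge]
      rw [hcur, pvUpd_eq_step]
    rw [hstep]
    have h := ihd (b + 1) (by omega) (by omega) (by omega)
      (pvUpd ans ((b : Int) - (iN : Int) + 1, pvMin nums (iN : Int) (b : Int)))
    have hc : ((b + 1 : Nat) : Int) = (b : Int) + 1 := by push_cast; ring
    rw [hc, show (b : Int) + 1 - 1 = (b : Int) from by ring] at h
    exact h

lemma pvAnsB_eq (nums : List Int) :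
    pvAnsB nums = (pvPairsB nums).foldl pvUpd (List.replicate (nums.length + 1) (0 : Int)) := by
  unfold pvAnsB pvPairsB
  rw [PySem.List.pyRange_zero_nat, List.foldl_map, List.foldl_flatMap]
  apply PySem.List.foldl_congr_mem
  intro acc iN hiN
  have hi : iN < nums.length := List.mem_range.mp hiN
  have h0 := pvInnerFold nums iN (nums.length - iN) iN (le_refl _) (le_of_lt hi) rfl acc
  rw [pvMin_pred nums (iN : Int)] at h0
  rw [show pvG nums (iN : Int) = PySem.List.pyGetD nums (iN : Int) 0 from rfl] at h0
  rw [h0]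

lemma pvAnsB_spec (nums : List Int) :
    (pvAnsB nums).length = nums.length + 1 ∧
      ∀ L : Nat, L < nums.length + 1 →
        (pvAnsB nums).getD L 0
          = pvMax0 (((pvPairsB nums).filter (fun p => p.1 = (L : Int))).map Prod.snd) := by
  have hps : ∀ p ∈ pvPairsB nums, 0 ≤ p.1 ∧
      p.1 < ((List.replicate (nums.length + 1) (0 : Int)).length : Int) := by
    intro p hp
    obtain ⟨iN, hiN, hp2⟩ := List.mem_flatMap.mp hp
    obtain ⟨j, hj, rfl⟩ := List.mem_map.mp hp2
    obtain ⟨hj1, hj2⟩ := PySem.List.mem_pyRange_one.mp hj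
    have hi : iN < nums.length := List.mem_range.mp hiN
    rw [List.length_replicate]
    constructor
    · simp only []
      omega
    · simp only []
      push_cast
      omega
  constructor
  · rw [pvAnsB_eq, length_foldl_pvUpd, List.length_replicate]
  · intro L hL
    rw [pvAnsB_eq, getD_foldl_pvUpd (pvPairsB nums) _ L
        (by simp only [List.length_replicate]; omega) hps,
      List.getD_replicate]
    · rfl
    · omega

-- ---- the per-length equality ----
lemma pvTables_eq (arr : List Int) (L : Nat) (h1 : 1 ≤ L) (hL : L ≤ arr.length) :
    (pvAns2 arr).getD L 0 = (pvAnsB arr).getD L 0 := by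
  rw [(pvAns2_spec arr).2 L h1 hL, (pvAnsB_spec arr).2 L (by omega)]
  apply pvMax0_eq_of
  · intro x hx
    obtain ⟨i, hi, rfl⟩ := List.mem_map.mp hx
    obtain ⟨hir, hif⟩ := List.mem_filter.mp hi
    have hiN : i < arr.length := List.mem_range.mp hir
    simp only [decide_eq_true_eq] at hif
    obtain ⟨hp1, hp2, hp3, hp4⟩ := (pvPrevList_spec arr).2 i hiN
    obtain ⟨hq1, hq2, hq3, hq4⟩ := (pvNextList_spec arr).2 i hiN
    set p := (pvPrevList arr).getD i 0 with hp
    set q := (pvNextList arr).getD i 0 with hq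
    have hspan : pvSpan arr (i : Int) = q - p - 1 := by
      unfold pvSpan
      rw [PySem.List.pyGetD_natCast, PySem.List.pyGetD_natCast]
    rw [hspan] at hif
    have hcast : (((p + 1).toNat : Nat) : Int) = p + 1 := by omega
    refine ⟨pvMin arr (p + 1) (p + L), ?_, ?_⟩
    · apply List.mem_map.mpr
      refine ⟨(p + L - (p + 1) + 1, pvMin arr (p + 1) (p + L)), ?_, rfl⟩
      apply List.mem_filter.mpr
      constructor
      · apply List.mem_flatMap.mpr
        refine ⟨(p + 1).toNat, List.mem_range.mpr (by omega), ?_⟩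
        apply List.mem_map.mpr
        refine ⟨p + L, ?_, ?_⟩
        · exact PySem.List.mem_pyRange_one.mpr ⟨by omega, by omega⟩
        · rw [hcast]
      · simp only [decide_eq_true_eq]
        omega
    · apply le_pvMin arr (p + 1) (p + L) _ (by omega)
      intro k hk1 hk2
      rcases lt_trichotomy k (i : Int) with hki | hki | hki
      · exact hp3 k (by omega) hki
      · rw [hki]
      · exact hq3 k hki (by omega)
  · intro x hx
    obtain ⟨pr, hpr, rfl⟩ := List.mem_map.mp hx
    obtain ⟨hprm, hprf⟩ := List.mem_filter.mp hpr
    obtain ⟨iN, hiN, hpr2⟩ := List.mem_flatMap.mp hprm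
    obtain ⟨j, hj, rfl⟩ := List.mem_map.mp hpr2
    obtain ⟨hj1, hj2⟩ := PySem.List.mem_pyRange_one.mp hj
    have hiNn : iN < arr.length := List.mem_range.mp hiN
    simp only [decide_eq_true_eq] at hprf
    -- x = pvMin arr iN j, with j - iN + 1 = L
    obtain ⟨k0, hk1, hk2, hk3, hk4⟩ := pvMin_lastWitness arr (iN : Int) j hj1
    have hk0cast : ((k0.toNat : Nat) : Int) = k0 := by omega
    have hk0n : k0.toNat < arr.length := by omega
    obtain ⟨hp1, hp2, hp3, hp4⟩ := (pvPrevList_spec arr).2 k0.toNat hk0n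
    obtain ⟨hq1, hq2, hq3, hq4⟩ := (pvNextList_spec arr).2 k0.toNat hk0n
    set p := (pvPrevList arr).getD k0.toNat 0 with hp
    set q := (pvNextList arr).getD k0.toNat 0 with hq
    rw [hk0cast] at hp2 hp3 hp4 hq1 hq3 hq4
    have hpi : p < (iN : Int) := by
      by_contra hc
      push Not at hc
      rcases hp4 with h | ⟨h0, hlt⟩
      · omega
      · exact absurd hlt (not_lt.mpr (hk3 ▸ pvMin_le arr iN j p hc (by omega)))
    have hqj : j < q := by
      by_contra hc
      push Not at hc
      rcases hq4 with h | hle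
      · omega
      · exact absurd (lt_of_lt_of_le (hk3 ▸ hk4 q hq1 hc) hle) (lt_irrefl _)
    have hspan2 : (L : Int) ≤ pvSpan arr ((k0.toNat : Nat) : Int) := by
      unfold pvSpan
      rw [PySem.List.pyGetD_natCast, PySem.List.pyGetD_natCast, ← hp, ← hq]
      omega
    refine ⟨pvG arr ((k0.toNat : Nat) : Int), ?_, ?_⟩
    · apply List.mem_map.mpr
      refine ⟨k0.toNat, List.mem_filter.mpr ⟨List.mem_range.mpr hk0n, ?_⟩, rfl⟩
      simp only [decide_eq_true_eq]
      exact hspan2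
    · rw [hk0cast, hk3]
  

-- ===== VERDICT (by name: the statement is the Claim_ definition above) =====
theorem findMaximums_spec : Claim_equal_findMaximums := by
  intro nums _
  show findMaximums nums = findMaximums_alt nums
  rw [findMaximums_eq, findMaximums_alt_eq,
      PySem.List.slice_from (pvAns2 nums) (a := 1) (by norm_num),
      PySem.List.slice_from (pvAnsB nums) (a := 1) (by norm_num)]
  have h2 := (pvAns2_spec nums).1
  have hB := (pvAnsB_spec nums).1
  have ht : ((1 : Int)).toNat = 1 := rfl
  rw [ht]
  apply List.ext_getElem
  · rw [List.length_drop, List.length_drop, h2, hB]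
  · intro k hk1 hk2
    rw [List.length_drop, h2] at hk1
    rw [List.getElem_drop, List.getElem_drop]
    rw [List.getElem_eq_getD (fallback := 0), List.getElem_eq_getD (fallback := 0)]
    rw [show 1 + k = k + 1 from by omega]
    exact pvTables_eq nums (k + 1) (by omega) (by omega)
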